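-- pv_equiv track=rewrite | github.com/youthlx/ToLuLu | practice/answer.py | single_cover
-- ===== SOURCE A (Python) =====
-- puke_code = {
-- 	'3': 3, '4': 4, '5': 5, '6': 6, '7': 7, '8': 8, '9': 9, '10': 10,
-- 	'J': 11, 'Q': 12, 'K': 13, 'A': 14, '2': 16, 'black_joker': 17, 'color_joker': 18,
-- }
--
-- puke_code_reverse = {
-- 	3: '3', 4: '4', 5: '5', 6: '6', 7: '7', 8: '8', 9: '9', 10: '10',
-- 	11: 'J', 12: 'Q', 13: 'K', 14: 'A', 16: '2', 17: 'black_joker', 18: 'color_joker',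
-- }
--
-- def decode_and_tidy(*args):
-- 	cards = [puke_code[arg] for arg in args]
-- 	cards.sort()
-- 	return cards
--
-- def encode_card(*args):
-- 	return [puke_code_reverse[arg] for arg in args]
--
-- def have_boom_in_mine(card_list):
-- 	cards = decode_and_tidy(*card_list)
-- 	if 17 in cards and 18 in cards:
-- 		return encode_card(17, 18)
-- 	if len(cards) < 4:
-- 		return []
-- 	for i in range(len(cards) - 3):
-- 		if cards[i] == cards[i + 3]:
-- 			return encode_card(cards[i], cards[i], cards[i], cards[i])
-- 	return []
--
-- def single_cover(enemy_cards, my_cards):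
-- 	boom_card = have_boom_in_mine(my_cards)
-- 	if boom_card:
-- 		return boom_card
-- 	enemy_codes = decode_and_tidy(*enemy_cards)
-- 	my_codes = decode_and_tidy(*my_cards)
-- 	single_code = enemy_codes[0]
-- 	for my_code in my_codes:
-- 		if my_code > single_code:
-- 			return encode_card(my_code)
-- 	return []
-- ===== SOURCE B (Python) =====
-- puke_code = {
-- 	'3': 3, '4': 4, '5': 5, '6': 6, '7': 7, '8': 8, '9': 9, '10': 10,
-- 	'J': 11, 'Q': 12, 'K': 13, 'A': 14, '2': 16, 'black_joker': 17, 'color_joker': 18,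
-- }
--
-- puke_code_reverse = {
-- 	3: '3', 4: '4', 5: '5', 6: '6', 7: '7', 8: '8', 9: '9', 10: '10',
-- 	11: 'J', 12: 'Q', 13: 'K', 14: 'A', 16: '2', 17: 'black_joker', 18: 'color_joker',
-- }
--
-- def single_cover(enemy_cards, my_cards):
--     # frequency-dict strategy: no sorting of my hand, no sliding window
--     my_vals = [puke_code[c] for c in my_cards]
--     counts = {}
--     for v in my_vals:
--         counts[v] = counts.get(v, 0) + 1
--     if 17 in counts and 18 in counts:
--         return ['black_joker', 'color_joker']
--     quads = [v for v, n in counts.items() if n >= 4]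
--     if quads:
--         return [puke_code_reverse[min(quads)]] * 4
--     target = min(puke_code[c] for c in enemy_cards)
--     beats = [v for v in my_vals if v > target]
--     return [puke_code_reverse[min(beats)]] if beats else []
-- ===== Notes on version B (the rewrite author's own statement) =====
-- stated objective: alternative
-- what changed: Replaces the sort-then-sliding-window bomb detection and the scan of the sorted hand with a frequency dict: bomb = min rank with count>=4 (after the double-joker check), cover = min of the decoded cards strictly above the enemy minimum, with no sorting at all.
import Mathlib
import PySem

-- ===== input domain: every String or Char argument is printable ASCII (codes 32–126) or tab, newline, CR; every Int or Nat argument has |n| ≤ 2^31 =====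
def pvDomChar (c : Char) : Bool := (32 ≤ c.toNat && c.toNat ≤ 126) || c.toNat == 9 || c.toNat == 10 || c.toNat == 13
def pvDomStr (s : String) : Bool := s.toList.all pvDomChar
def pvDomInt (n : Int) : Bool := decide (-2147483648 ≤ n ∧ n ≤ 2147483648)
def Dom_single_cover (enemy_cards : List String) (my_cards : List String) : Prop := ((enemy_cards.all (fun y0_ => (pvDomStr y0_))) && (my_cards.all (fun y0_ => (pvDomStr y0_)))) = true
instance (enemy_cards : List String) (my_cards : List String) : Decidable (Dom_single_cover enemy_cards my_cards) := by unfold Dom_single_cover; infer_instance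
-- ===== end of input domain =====

-- B replaces A's sort + sliding-window bomb scan and the scan of the sorted hand by a frequency
-- dict (bomb = smallest rank counted ≥ 4) and min-of-filter (cover = smallest decoded card above
-- the enemy minimum); same return value, no sorting. Equivalence is about the return value.

-- ===== PORT A =====
def pukeCode : PySem.Dict String Int := PySem.Dict.ofList
  [("3",3),("4",4),("5",5),("6",6),("7",7),("8",8),("9",9),("10",10),
   ("J",11),("Q",12),("K",13),("A",14),("2",16),("black_joker",17),("color_joker",18)]

def pukeCodeReverse : PySem.Dict Int String := PySem.Dict.ofList
  [(3,"3"),(4,"4"),(5,"5"),(6,"6"),(7,"7"),(8,"8"),(9,"9"),(10,"10"),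
   (11,"J"),(12,"Q"),(13,"K"),(14,"A"),(16,"2"),(17,"black_joker"),(18,"color_joker")]

-- [puke_code[arg] for arg in args]; none = KeyError (both Pythons contain this comprehension)
def decodeList : List String → Option (List Int)
  | [] => some []
  | c :: rest =>
    match pukeCode.get? c, decodeList rest with
    | some v, some vs => some (v :: vs)
    | _, _ => none

def decode_and_tidy (args : List String) : Option (List Int) :=
  (decodeList args).map (fun cards => PySem.List.sorted cards (fun x => x) false)

-- keys are always present at every call site, so the .getD "" default is never used
def encode_card (args : List Int) : List String :=
  args.map (fun a => (pukeCodeReverse.get? a).getD "")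

-- the 'for i in range(len(cards)-3): if cards[i] == cards[i+3]' window scan, as the
-- structural recursion over suffixes (same comparisons in the same order)
def boomScan : List Int → List String
  | a :: b :: c :: d :: t => if a == d then encode_card [a, a, a, a] else boomScan (b :: c :: d :: t)
  | _ => []

def have_boom_in_mine (card_list : List String) : Option (List String) :=
  (decode_and_tidy card_list).map (fun cards =>
    if cards.contains 17 && cards.contains 18 then encode_card [17, 18]
    else if cards.length < 4 then []
    else boomScan cards)

def coverLoop (single : Int) : List Int → List String
  | [] => []
  | c :: rest => if single < c then encode_card [c] else coverLoop single rest

def single_cover (enemy_cards : List String) (my_cards : List String) : List String :=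
  match have_boom_in_mine my_cards with
  | none => []          -- KeyError in Python: outside Pre_
  | some boom =>
    if boom ≠ [] then boom
    else
      match decode_and_tidy enemy_cards, decode_and_tidy my_cards with
      | some enemy_codes, some my_codes =>
        match enemy_codes with
        | [] => []      -- IndexError on enemy_codes[0]: outside Pre_
        | single :: _ => coverLoop single my_codes
      | _, _ => []      -- KeyError: outside Pre_

-- ===== PORT B =====
def encode1 (v : Int) : String := (pukeCodeReverse.get? v).getD ""

def single_cover_alt (enemy_cards : List String) (my_cards : List String) : List String :=
  match decodeList my_cards with
  | none => []          -- KeyError: outside Pre_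
  | some my_vals =>
    let counts := my_vals.foldl (fun d v => d.insert v (d.getD v 0 + 1)) (PySem.Dict.empty : PySem.Dict Int Int)
    if counts.contains 17 && counts.contains 18 then ["black_joker", "color_joker"]
    else
      let quads := (counts.items.filter (fun p => 4 ≤ p.2)).map Prod.fst
      if quads ≠ [] then
        match PySem.List.min? quads (fun x => x) with
        | some q => List.replicate 4 (encode1 q)
        | none => []    -- unreachable: quads ≠ []
      else
        match decodeList enemy_cards with
        | none => []    -- KeyError: outside Pre_
        | some enemy_vals =>
          match PySem.List.min? enemy_vals (fun x => x) with
          | none => []  -- ValueError (min of empty): outside Pre_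
          | some target =>
            let beats := my_vals.filter (fun v => target < v)
            match PySem.List.min? beats (fun x => x) with
            | some m => [encode1 m]
            | none => []

-- ===== PRECONDITION & SPEC =====
def validCards : List String :=
  ["3","4","5","6","7","8","9","10","J","Q","K","A","2","black_joker","color_joker"]

-- Pre_ excludes exactly the inputs where Python A raises: a card name outside the deck (KeyError),
-- and an empty/invalid enemy hand reached because my hand holds no bomb (IndexError/KeyError).
def Pre_single_cover (enemy_cards : List String) (my_cards : List String) : Prop :=
  (∀ c ∈ my_cards, c ∈ validCards) ∧
  ((("black_joker" ∈ my_cards ∧ "color_joker" ∈ my_cards) ∨ ∃ c ∈ validCards, 4 ≤ my_cards.count c)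
    ∨ ((∀ c ∈ enemy_cards, c ∈ validCards) ∧ enemy_cards ≠ []))

instance (enemy_cards : List String) (my_cards : List String) : Decidable (Pre_single_cover enemy_cards my_cards) := by
  unfold Pre_single_cover; infer_instance

def pvWitness_single_cover : List String × List String := (["3"], ["A", "4"])

def Spec_single_cover (enemy_cards : List String) (my_cards : List String) (out : List String) : Prop := out = single_cover_alt enemy_cards my_cards
instance (enemy_cards : List String) (my_cards : List String) (out : List String) : Decidable (Spec_single_cover enemy_cards my_cards out) := by unfold Spec_single_cover; infer_instance

-- ===== CLAIM (what is proved, stated in full; the proofs are below) =====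
def Claim_equal_single_cover : Prop := ∀ (enemy_cards : List String) (my_cards : List String), Dom_single_cover enemy_cards my_cards → Pre_single_cover enemy_cards my_cards → Spec_single_cover enemy_cards my_cards (single_cover enemy_cards my_cards)

-- ===== LEMMAS AND PROOFS =====

-- the value of min? over id is determined by the multiset
theorem min?_id_value (l : List Int) (m : Int) (hm : m ∈ l) (hmin : ∀ y ∈ l, m ≤ y) :
    PySem.List.min? l (fun x => x) = some m := by
  cases l with
  | nil => simp at hm
  | cons x t =>
      rw [PySem.List.min?_id_cons]
      have h1 := PySem.List.foldl_min_le t x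
      have h2 := PySem.List.foldl_min_mem t x
      have hle : t.foldl min x ≤ m := by
        rcases List.mem_cons.mp hm with h | h
        · exact h ▸ h1.1
        · exact h1.2 m h
      have hge : m ≤ t.foldl min x := by
        rcases h2 with h | h
        · rw [h]; exact hmin x (by simp)
        · exact hmin _ (List.mem_cons_of_mem x h)
      exact congrArg some (le_antisymm hle hge)

-- window scan on a sorted list: no quad ⇒ []
theorem boomScan_eq_nil (s : List Int) (hpw : s.Pairwise (· ≤ ·))
    (hno : ∀ v : Int, s.count v < 4) : boomScan s = [] := by
  induction s using boomScan.induct with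
  | case1 a b c d t had =>
      exfalso
      have hd : a = d := by simpa using had
      simp only [List.pairwise_cons] at hpw
      obtain ⟨h1, h2, h3, -⟩ := hpw
      have hb : b = a := le_antisymm (hd ▸ h2 d (by simp)) (h1 b (by simp))
      have hc : c = a := le_antisymm (hd ▸ h3 d (by simp)) (h1 c (by simp))
      have := hno a
      simp [hb, hc, ← hd] at this
      omega
  | case2 a b c d t had ih =>
      simp only [boomScan, if_neg had]
      exact ih hpw.tail (fun v => lt_of_le_of_lt ((List.sublist_cons_self a _).count_le v) (hno v))
  | case3 s h =>
      match s, h with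
      | [], _ => rfl
      | [a], _ => rfl
      | [a, b], _ => rfl
      | [a, b, c], _ => rfl
      | a :: b :: c :: d :: t, h => exact absurd (h a b c d t rfl) not_false

-- window scan on a sorted list returns the smallest quad rank
theorem boomScan_eq_quad (s : List Int) (hpw : s.Pairwise (· ≤ ·)) (q : Int)
    (hq : 4 ≤ s.count q) (hmin : ∀ v : Int, 4 ≤ s.count v → q ≤ v) :
    boomScan s = encode_card [q, q, q, q] := by
  induction s using boomScan.induct with
  | case1 a b c d t had =>
      have hd : a = d := by simpa using had
      simp only [List.pairwise_cons] at hpw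
      obtain ⟨h1, h2, h3, -⟩ := hpw
      have hca : 4 ≤ List.count a (a :: b :: c :: d :: t) := by
        have hb : b = a := le_antisymm (hd ▸ h2 d (by simp)) (h1 b (by simp))
        have hc : c = a := le_antisymm (hd ▸ h3 d (by simp)) (h1 c (by simp))
        simp [hb, hc, ← hd]
      have hqa : q ≤ a := hmin a hca
      have haq : a ≤ q := by
        have hqmem : q ∈ a :: b :: c :: d :: t := List.count_pos_iff.mp (by omega)
        rcases List.mem_cons.mp hqmem with h | h
        · exact le_of_eq h.symm
        · exact h1 q h
      have : a = q := le_antisymm haq hqa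
      simp only [boomScan, if_pos had]
      rw [this]
  | case2 a b c d t had ih =>
      have hd : ¬ a = d := by simpa using had
      simp only [List.pairwise_cons] at hpw
      obtain ⟨h1, h2, h3, hpw'⟩ := hpw
      have h4 : ∀ x ∈ t, d ≤ x := hpw'.1
      have hta : List.count a t = 0 := List.count_eq_zero.mpr (fun hx =>
        absurd rfl (ne_of_gt (lt_of_lt_of_le (lt_of_le_of_ne (h1 d (by simp)) hd) (h4 a hx))))
      have hca : List.count a (a :: b :: c :: d :: t) ≤ 3 := by
        simp only [List.count_cons, hta, beq_iff_eq]
        split_ifs <;> omega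
      have hqna : ¬ (q = a) := by
        intro h
        rw [h] at hq
        omega
      have hqt : 4 ≤ List.count q (b :: c :: d :: t) := by
        have hc : List.count q (a :: b :: c :: d :: t)
            = List.count q (b :: c :: d :: t) + if (a == q) = true then 1 else 0 :=
          List.count_cons
        rw [if_neg (by simp only [beq_iff_eq]; exact fun h => hqna h.symm)] at hc
        omega
      simp only [boomScan, if_neg had]
      refine ih (List.pairwise_cons.mpr ⟨h2, List.pairwise_cons.mpr ⟨h3,
        List.pairwise_cons.mpr ⟨hpw'.1, hpw'.2⟩⟩⟩) hqt ?_
      exact fun v hv => hmin v (le_trans hv ((List.sublist_cons_self a _).count_le v))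
  | case3 s h =>
      exfalso
      have h4 : 4 ≤ s.length := le_trans hq (List.count_le_length)
      match s, h, h4 with
      | a :: b :: c :: d :: t, h, _ => exact h a b c d t rfl

-- coverLoop on a sorted list = min of the filter
theorem coverLoop_spec (t : Int) (s : List Int) (hpw : s.Pairwise (· ≤ ·)) :
    coverLoop t s =
      match PySem.List.min? (s.filter (fun v => decide (t < v))) (fun x => x) with
      | some m => encode_card [m]
      | none => [] := by
  induction s with
  | nil => rfl
  | cons h rest ih =>
      by_cases hlt : t < h
      · have hall : ∀ y ∈ rest, h ≤ y := (List.pairwise_cons.mp hpw).1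
        have hfil : (h :: rest).filter (fun v => decide (t < v))
            = h :: rest.filter (fun v => decide (t < v)) := by simp [hlt]
        have hmin : PySem.List.min? ((h :: rest).filter (fun v => decide (t < v))) (fun x => x)
            = some h := by
          rw [hfil]
          exact min?_id_value _ h (by simp)
            (fun y hy => by
              rcases List.mem_cons.mp hy with h' | h'
              · exact le_of_eq h'.symm
              · exact hall y (List.mem_of_mem_filter h'))
        simp only [coverLoop, if_pos hlt, hmin]
      · have hfil : (h :: rest).filter (fun v => decide (t < v))
            = rest.filter (fun v => decide (t < v)) := by simp [hlt]
        simp only [coverLoop, if_neg hlt, hfil]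
        exact ih hpw.tail

theorem min?_id_perm (l1 l2 : List Int) (hp : l1.Perm l2) :
    PySem.List.min? l1 (fun x => x) = PySem.List.min? l2 (fun x => x) := by
  cases h1 : PySem.List.min? l1 (fun x => x) with
  | none =>
      rw [PySem.List.min?_eq_none_iff] at h1
      rw [eq_comm, PySem.List.min?_eq_none_iff]
      exact ((h1 ▸ hp).symm : l2.Perm []).eq_nil
  | some mval =>
      have hmem := PySem.List.min?_mem h1
      have hmin := PySem.List.min?_isMin h1
      exact (min?_id_value l2 mval (hp.mem_iff.mp hmem)
        (fun y hy => hmin y (hp.mem_iff.mpr hy))).symm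

theorem quads_eq (vs : List Int) :
    ((PySem.Dict.counter vs).items.filter (fun p => 4 ≤ p.2)).map Prod.fst
      = (PySem.Set.ofList vs).filter (fun k => decide ((4 : Int) ≤ (vs.count k : Int))) := by
  rw [PySem.Dict.items_counter]
  rw [List.filter_map, List.map_map]
  simp [Function.comp_def]

theorem encode_card_pair : encode_card [17, 18] = ["black_joker", "color_joker"] := by decide

theorem encode_card_quad (q : Int) : encode_card [q, q, q, q] = List.replicate 4 (encode1 q) := by
  simp [encode_card, encode1, List.replicate]

theorem single_cover_spec : Claim_equal_single_cover := by
  intro e m _ _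
  unfold Spec_single_cover single_cover single_cover_alt
  cases hm : decodeList m with
  | none => simp [have_boom_in_mine, decode_and_tidy, hm]
  | some vs =>
    simp only [have_boom_in_mine, decode_and_tidy, hm, Option.map_some]
    rw [PySem.Dict.foldl_insert_getD_add_one_eq_counter]
    have hperm : (PySem.List.sorted vs (fun x => x) false).Perm vs :=
      PySem.List.sorted_perm vs (fun x => x) false
    have hpw : (PySem.List.sorted vs (fun x => x) false).Pairwise (· ≤ ·) :=
      PySem.List.sorted_pairwise vs (fun x => x)
    set s := PySem.List.sorted vs (fun x => x) false with hs
    by_cases hj : 17 ∈ vs ∧ 18 ∈ vs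
    · -- both jokers present: both return the joker pair
      have hA : (s.contains 17 && s.contains 18) = true := by
        simp [hperm.mem_iff, hj.1, hj.2]
      have hB : ((PySem.Dict.counter vs).contains 17 && (PySem.Dict.counter vs).contains 18) = true := by
        simp [PySem.Dict.contains_counter, hj.1, hj.2]
      rw [hA, hB]
      simp [encode_card_pair]
    · -- not both jokers
      have hA : (s.contains 17 && s.contains 18) = false := by
        rcases not_and_or.mp hj with h | h <;>
          simp [hperm.mem_iff, h]
      have hB : ((PySem.Dict.counter vs).contains 17 && (PySem.Dict.counter vs).contains 18) = false := by
        rcases not_and_or.mp hj with h | h <;>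
          simp [PySem.Dict.contains_counter, h]
      rw [hA, hB]
      simp only [Bool.false_eq_true, if_false]
      rw [quads_eq]
      cases hq : PySem.List.min? ((PySem.Set.ofList vs).filter
          (fun k => decide ((4 : Int) ≤ (vs.count k : Int)))) (fun x => x) with
      | some q =>
          -- there is a bomb; q is its smallest rank
          have hqmem := PySem.List.min?_mem hq
          have hqmin := PySem.List.min?_isMin hq
          have hqcount : 4 ≤ vs.count q := by
            have := (List.mem_filter.mp hqmem).2
            simp at this
            exact_mod_cast this
          have hmin' : ∀ v : Int, 4 ≤ s.count v → q ≤ v := by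
            intro v hv
            rw [hperm.count_eq] at hv
            refine hqmin v (List.mem_filter.mpr ⟨?_, by simpa using hv⟩)
            exact (PySem.Set.mem_ofList vs v).mpr (List.count_pos_iff.mp (by omega))
          have hbs : boomScan s = encode_card [q, q, q, q] :=
            boomScan_eq_quad s hpw q (by rw [hperm.count_eq]; exact hqcount) hmin'
          have hlen : ¬ s.length < 4 := by
            have h1 : s.count q ≤ s.length := List.count_le_length
            rw [hperm.count_eq] at h1
            omega
          have hnonnil : ((PySem.Set.ofList vs).filter
              (fun k => decide ((4 : Int) ≤ (vs.count k : Int)))) ≠ [] := by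
            intro h
            rw [h] at hqmem
            exact absurd hqmem (List.not_mem_nil)
          rw [if_neg hlen, if_pos hnonnil, hbs, encode_card_quad]
          simp
      | none =>
          -- no bomb anywhere: both fall through to the cover search
          have hnil := (PySem.List.min?_eq_none_iff _ _).mp hq
          have hno : ∀ v : Int, vs.count v < 4 := by
            intro v
            by_contra h
            rw [not_lt] at h
            have hv : v ∈ (PySem.Set.ofList vs).filter
                (fun k => decide ((4 : Int) ≤ (vs.count k : Int))) :=
              List.mem_filter.mpr ⟨(PySem.Set.mem_ofList vs v).mpr
                (List.count_pos_iff.mp (by omega)), by simpa using h⟩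
            rw [hnil] at hv
            exact absurd hv (List.not_mem_nil)
          have hboom : (if s.length < 4 then [] else boomScan s) = [] := by
            by_cases hlen : s.length < 4
            · rw [if_pos hlen]
            · rw [if_neg hlen]
              exact boomScan_eq_nil s hpw (fun v => by rw [hperm.count_eq]; exact hno v)
          rw [hboom, hnil]
          simp only [ne_eq, not_true_eq_false, if_false]
          cases he : decodeList e with
          | none => simp
          | some ev =>
              simp only [Option.map_some]
              cases hse : PySem.List.sorted ev (fun x => x) false with
              | nil =>
                  have : ev = [] := (PySem.List.sorted_eq_nil_iff ev (fun x => x) false).mp hse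
                  subst this
                  rw [(PySem.List.min?_eq_none_iff ([] : List Int) _).mpr rfl]
              | cons h0 tl =>
                  have hmem0 : h0 ∈ ev := (PySem.List.mem_sorted ev (fun x => x) false h0).mp
                    (by rw [hse]; simp)
                  have hmin0 : ∀ y ∈ ev, h0 ≤ y := PySem.List.key_head_sorted_le ev (fun x => x) hse
                  have hminev : PySem.List.min? ev (fun x => x) = some h0 :=
                    min?_id_value ev h0 hmem0 hmin0
                  rw [hminev,
                    show (match h0 :: tl with
                      | [] => ([] : List String)
                      | single :: _ => coverLoop single s) = coverLoop h0 s from rfl,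
                    coverLoop_spec h0 s hpw]
                  rw [min?_id_perm _ _ (hperm.filter _)]
                  change (match PySem.List.min? (List.filter (fun v => decide (h0 < v)) vs)
                        (fun x => x) with
                      | some m => encode_card [m]
                      | none => [])
                    = (match PySem.List.min? (List.filter (fun v => decide (h0 < v)) vs)
                        (fun x => x) with
                      | some m => [encode1 m]
                      | none => [])
                  cases PySem.List.min? (List.filter (fun v => decide (h0 < v)) vs) (fun x => x) <;> rfl
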